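-- pv_equiv track=rewrite | github.com/bar-ang/ProjectEulerSolutions | oldfiles/pe893.py | skip_num
-- ===== SOURCE A (Python) =====
-- def skip_num(n):
--     # try n with 1 or 7.
--     if n < 10:
--         return None
--
--     c = 0
--     while n > 0:
--         if n % 10 in [1, 7, 0]:
--             return c
--         n //= 10
--         c += 1
--     return None
-- ===== SOURCE B (Python) =====
-- def skip_num(n):
--     if n < 10:
--         return None
--     rs = str(n)[::-1]
--     positions = [rs.index(d) for d in "017" if d in rs]
--     return min(positions) if positions else None
-- ===== Notes on version B (the rewrite author's own statement) =====
-- stated objective: alternative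
-- what changed: Instead of A's arithmetic modulo/floordiv scan over the number, B converts n to its reversed decimal string once and returns the minimum over per-target-digit first-index searches (rs.index(d) for d in '017'), None if no target digit occurs.
import Mathlib
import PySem

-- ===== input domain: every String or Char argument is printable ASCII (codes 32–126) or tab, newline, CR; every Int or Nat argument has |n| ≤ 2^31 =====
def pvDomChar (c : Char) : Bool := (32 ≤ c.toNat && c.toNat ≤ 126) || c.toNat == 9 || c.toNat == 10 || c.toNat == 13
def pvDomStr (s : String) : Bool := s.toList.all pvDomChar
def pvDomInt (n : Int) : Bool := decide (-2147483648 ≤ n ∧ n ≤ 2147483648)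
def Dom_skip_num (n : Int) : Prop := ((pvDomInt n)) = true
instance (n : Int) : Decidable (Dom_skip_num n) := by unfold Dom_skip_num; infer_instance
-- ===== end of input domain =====

-- B replaces A's arithmetic modulo/floordiv digit scan by a string-based search: it
-- reverses str(n) once and takes the minimum of the per-target-digit first indices
-- rs.index(d) for d in "017"; objective: alternative decomposition, same cost.

-- ===== PORT A =====
-- the while loop of A: state (n, c)
def skipLoopA (n c : Int) : Option Int :=
  if h : 0 < n then
    if ([1, 7, 0] : List Int).contains (PySem.Int.mod n 10) then some c
    else skipLoopA (PySem.Int.floordiv n 10) (c + 1)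
  else none
termination_by n.toNat
decreasing_by
  rw [PySem.Int.floordiv_eq_ediv_of_pos (by norm_num : (0:Int) < 10)]
  have := Int.mul_ediv_add_emod n 10
  have := Int.emod_nonneg n (by norm_num : (10:Int) ≠ 0)
  have := Int.emod_lt_of_pos n (by norm_num : (0:Int) < 10)
  omega

def skip_num (n : Int) : Option Int :=
  if n < 10 then none
  else skipLoopA n 0

-- ===== PORT B =====
def skip_num_alt (n : Int) : Option Int :=
  if n < 10 then none
  else
    -- rs = str(n)[::-1]; the step -1 slice of a string is its reversal
    -- (exact: PySem.Str.slice?_none_none_neg_one)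
    let rs : List Char := (PySem.Int.toStr n).toList.reverse
    -- positions = [rs.index(d) for d in "017" if d in rs]
    -- ("017" is iterated as its three characters; rs.index(d) is PySem.List.index?,
    --  guaranteed to return under the 'd in rs' guard)
    let positions : List Int :=
      (['0', '1', '7'] : List Char).filterMap (fun d =>
        if rs.contains d then (PySem.List.index? rs d).map (fun k => (k : Int)) else none)
    -- min(positions) if positions else None
    if positions.isEmpty then none else PySem.List.min? positions (fun x => x)

-- ===== PRECONDITION & SPEC =====
def Spec_skip_num (n : Int) (out : Option Int) : Prop := out = skip_num_alt n
instance (n : Int) (out : Option Int) : Decidable (Spec_skip_num n out) := by unfold Spec_skip_num; infer_instance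

-- ===== CLAIM (what is proved, stated in full; the proofs are below) =====
def Claim_equal_skip_num : Prop := ∀ (n : Int), Dom_skip_num n → Spec_skip_num n (skip_num n)

-- ===== LEMMAS AND PROOFS =====

-- the reversed decimal digit characters of m (least significant first)
def digRev (m : Nat) : List Char :=
  if m / 10 = 0 then [Nat.digitChar (m % 10)]
  else Nat.digitChar (m % 10) :: digRev (m / 10)
termination_by m
decreasing_by exact Nat.div_lt_self (by omega) (by omega)

lemma toDigitsCore_eq (f : Nat) : ∀ (m : Nat) (acc : List Char), m < f →
    Nat.toDigitsCore 10 f m acc = (digRev m).reverse ++ acc := by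
  induction f with
  | zero => intro m acc h; omega
  | succ f ih =>
      intro m acc h
      rw [Nat.toDigitsCore]
      by_cases h0 : m / 10 = 0
      · rw [if_pos h0, digRev, if_pos h0]; rfl
      · rw [if_neg h0, ih (m / 10) _ (by
          have h2 : m / 10 < m := Nat.div_lt_self (by omega) (by omega)
          omega)]
        conv_rhs => rw [digRev, if_neg h0]
        simp

lemma toDigits_reverse (m : Nat) : (Nat.toDigits 10 m).reverse = digRev m := by
  rw [Nat.toDigits, toDigitsCore_eq (m + 1) m [] (by omega)]
  simp

-- the scan over the reversed digit characters that mirrors A's loop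
def FScan : List Char → Int → Option Int
  | [], _ => none
  | d :: t, c => if d = '0' ∨ d = '1' ∨ d = '7' then some c else FScan t (c + 1)

lemma digRev_cons (m : Nat) :
    digRev m = Nat.digitChar (m % 10) ::
      (if m / 10 = 0 then [] else digRev (m / 10)) := by
  rw [digRev]
  by_cases h0 : m / 10 = 0 <;> simp [h0]

lemma digit_mem_iff (r : Nat) (h : r < 10) :
    (([1, 7, 0] : List Int).contains (r : Int) = true) ↔
      (Nat.digitChar r = '0' ∨ Nat.digitChar r = '1' ∨ Nat.digitChar r = '7') := by
  interval_cases r <;> simp <;> decide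

lemma skipA_eq_F (n c : Int) (h : 0 < n) : skipLoopA n c = FScan (digRev n.toNat) c := by
  fun_induction skipLoopA n c with
  | case1 n c hpos htest =>
      rw [digRev_cons, FScan]
      have hmod : PySem.Int.mod n 10 = ((n.toNat % 10 : Nat) : Int) := by
        rw [PySem.Int.mod_eq_emod_of_pos (by norm_num)]
        omega
      rw [hmod] at htest
      rw [if_pos ((digit_mem_iff _ (Nat.mod_lt _ (by omega))).mp htest)]
  | case2 n c hpos htest ih =>
      rw [digRev_cons, FScan]
      have hmod : PySem.Int.mod n 10 = ((n.toNat % 10 : Nat) : Int) := by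
        rw [PySem.Int.mod_eq_emod_of_pos (by norm_num)]
        omega
      rw [hmod] at htest
      rw [if_neg (by
        intro hc
        exact htest ((digit_mem_iff _ (Nat.mod_lt _ (by omega))).mpr hc))]
      have hdiv : (PySem.Int.floordiv n 10) = ((n.toNat / 10 : Nat) : Int) := by
        rw [PySem.Int.floordiv_eq_ediv_of_pos (by norm_num)]
        omega
      by_cases hsmall : n.toNat / 10 = 0
      · rw [if_pos hsmall, FScan]
        rw [skipLoopA]
        rw [dif_neg (by rw [hdiv, hsmall]; norm_num)]
      · rw [if_neg hsmall]
        have hpos' : 0 < PySem.Int.floordiv n 10 := by rw [hdiv]; omega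
        have harg : (PySem.Int.floordiv n 10).toNat = n.toNat / 10 := by
          rw [hdiv]; exact Int.toNat_natCast _
        rw [ih hpos', harg]
  | case3 n c hpos => omega

-- min on Option Nat, none = +infinity
def ominN : Option Nat → Option Nat → Option Nat
  | none, b => b
  | some a, none => some a
  | some a, some b => some (min a b)

lemma ominN_zero_left (x : Option Nat) : ominN (some 0) x = some 0 := by
  cases x <;> simp [ominN]

lemma ominN_zero_right (x : Option Nat) : ominN x (some 0) = some 0 := by
  cases x <;> simp [ominN]

lemma ominN_map_succ (x y : Option Nat) :
    ominN (x.map (· + 1)) (y.map (· + 1)) = (ominN x y).map (· + 1) := by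
  cases x <;> cases y <;> simp [ominN]

lemma FScan_eq_min (rs : List Char) : ∀ (c : Int),
    FScan rs c =
      (ominN (PySem.List.index? rs '0')
        (ominN (PySem.List.index? rs '1') (PySem.List.index? rs '7'))).map
        (fun k => c + (k : Int)) := by
  induction rs with
  | nil => intro c; simp [FScan, ominN]
  | cons d t ih =>
      intro c
      by_cases hd : d = '0' ∨ d = '1' ∨ d = '7'
      · rw [FScan, if_pos hd]
        rcases hd with h | h | h <;> subst h
        · rw [PySem.List.index?_cons_self, ominN_zero_left]
          simp
        · rw [PySem.List.index?_cons_self,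
            ominN_zero_left, ominN_zero_right]
          simp
        · rw [PySem.List.index?_cons_self, ominN_zero_right, ominN_zero_right]
          simp
      · rw [not_or, not_or] at hd
        rw [FScan, if_neg (by tauto), ih (c + 1),
          PySem.List.index?_cons_of_ne t hd.1,
          PySem.List.index?_cons_of_ne t hd.2.1,
          PySem.List.index?_cons_of_ne t hd.2.2,
          ominN_map_succ, ominN_map_succ]
        cases ominN (PySem.List.index? t '0')
          (ominN (PySem.List.index? t '1') (PySem.List.index? t '7')) with
        | none => rfl
        | some k => simp; ring

lemma alt_eq (n : Int) (h : ¬ n < 10) :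
    skip_num_alt n = FScan ((PySem.Int.toStr n).toList.reverse) 0 := by
  rw [skip_num_alt, if_neg h, FScan_eq_min]
  set rs := (PySem.Int.toStr n).toList.reverse with hrs
  have hcb : ∀ d : Char, rs.contains d = (PySem.List.index? rs d).isSome := by
    intro d
    by_cases hm : d ∈ rs
    · rw [(PySem.List.index?_isSome_iff rs d).mpr hm]
      simp [hm]
    · rw [(PySem.List.index?_eq_none_iff rs d).mpr hm]
      simp [hm]
  simp only [hcb]
  rcases h0 : PySem.List.index? rs '0' with _ | a <;>
  rcases h1 : PySem.List.index? rs '1' with _ | b <;>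
  rcases h7 : PySem.List.index? rs '7' with _ | c <;>
  · rw [List.filterMap_cons, List.filterMap_cons, List.filterMap_cons, List.filterMap_nil,
      h0, h1, h7]
    simp [ominN]
    try (rw [PySem.List.min?_id_cons]; simp [List.foldl]; try omega)

-- ===== VERDICT (by name: the statement is the Claim_ definition above) =====
theorem skip_num_spec : Claim_equal_skip_num := by
  intro n _
  unfold Spec_skip_num
  by_cases h : n < 10
  · rw [skip_num, skip_num_alt, if_pos h, if_pos h]
  · rw [skip_num, if_neg h, alt_eq n h, skipA_eq_F n 0 (by omega),
      PySem.Int.toList_toStr]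
    have : PySem.Int.toChars n = Nat.toDigits 10 n.toNat := by
      rw [PySem.Int.toChars, if_neg (by omega)]
    rw [this, toDigits_reverse]
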